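-- pv_equiv track=rewrite | github.com/luiscosta35/RaspBerry_Projects | cocktail_machine4.py | char2bin
-- ===== SOURCE A (Python) =====
-- def char2bin(char):
--     """Converteix un caràcter en una representació binària de 8 bits i la retorna com una tupla d'enters."""
--     strink = bin(ord(char))[2:]
--     strink = '0' * (8 - len(strink)) + strink
--     resultat = ''
--     for bit in strink:
--         resultat = bit + resultat
--     res = resultat[4:] + resultat[:4]
--     tupla = tuple([int(element) for element in res])
--     return tupla
-- ===== SOURCE B (Python) =====
-- def char2bin(char):
--     n = ord(char)
--     L = max(8, n.bit_length())
--     bits = [(n >> i) & 1 for i in range(L)]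
--     return tuple(bits[4:] + bits[:4])
-- ===== Notes on version B (the rewrite author's own statement) =====
-- stated objective: idiomatic
-- what changed: B replaces A's bin()/zfill-style padding, character-reversing loop, string slicing and per-character int() parsing with direct integer bit arithmetic: bits = [(n >> i) & 1 for i in range(max(8, n.bit_length()))], then the nibble rotation bits[4:] + bits[:4].
import Mathlib
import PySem

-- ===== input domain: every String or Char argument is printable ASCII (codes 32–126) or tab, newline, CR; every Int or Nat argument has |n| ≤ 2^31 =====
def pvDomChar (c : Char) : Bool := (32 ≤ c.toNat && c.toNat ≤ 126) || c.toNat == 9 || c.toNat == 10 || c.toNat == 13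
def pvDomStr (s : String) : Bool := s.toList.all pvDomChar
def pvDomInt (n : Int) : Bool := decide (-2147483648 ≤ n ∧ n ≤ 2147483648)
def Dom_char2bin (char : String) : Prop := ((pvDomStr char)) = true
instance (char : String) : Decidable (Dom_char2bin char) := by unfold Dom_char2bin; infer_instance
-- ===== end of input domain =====

-- B replaces A's bin()/zfill/reversing-loop/string-slicing pipeline with direct bit
-- arithmetic ((n >> i) & 1 over range(max(8, n.bit_length()))); same return value.

-- ===== PORT A =====
-- A's body on the character code n = ord(char); literal step-for-step transliteration.
def char2binCore (n : Nat) : List Int :=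
  -- strink = bin(ord(char))[2:]
  let strink := PySem.List.slice (PySem.Int.toBinChars0b (n : Int)) (some 2) none
  -- strink = '0' * (8 - len(strink)) + strink   ('0'*k is empty for k ≤ 0, like List.replicate)
  let strink := List.replicate (8 - strink.length) '0' ++ strink
  -- for bit in strink: resultat = bit + resultat
  let resultat := strink.foldl (fun acc bit => bit :: acc) ([] : List Char)
  -- res = resultat[4:] + resultat[:4]
  let res := PySem.List.slice resultat (some 4) none ++ PySem.List.slice resultat none (some 4)
  -- tuple(int(element) for element in res)   (each element is '0'/'1', so int() succeeds)
  res.map (fun e => (PySem.Int.ofChars? [e]).getD 0)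

def char2bin (char : String) : List Int :=
  match char.toList with
  | [c] => char2binCore c.toNat   -- ord(char); any other length raises TypeError (outside Pre_)
  | _ => []

-- ===== PORT B =====
def char2binAltCore (n : Nat) : List Int :=
  let L := max 8 (PySem.Int.bitLength (n : Int))
  -- bits = [(n >> i) & 1 for i in range(L)]; n ≥ 0 so Nat >>> / &&& are exact here
  let bits := (PySem.List.pyRange 0 (L : Int) 1).map (fun i => (((n >>> i.toNat) &&& 1 : Nat) : Int))
  PySem.List.slice bits (some 4) none ++ PySem.List.slice bits none (some 4)

def char2bin_alt (char : String) : List Int :=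
  if char.toList.length = 1 then char2binAltCore char.toList.headI.toNat else []

-- ===== PRECONDITION & SPEC =====
-- ord() raises TypeError unless the string has exactly one character.
def Pre_char2bin (char : String) : Prop := char.toList.length = 1
instance (char : String) : Decidable (Pre_char2bin char) := by unfold Pre_char2bin; infer_instance
def pvWitness_char2bin : String := "A"

def Spec_char2bin (char : String) (out : List Int) : Prop := out = char2bin_alt char
instance (char : String) (out : List Int) : Decidable (Spec_char2bin char out) := by unfold Spec_char2bin; infer_instance

-- ===== CLAIM (what is proved, stated in full; the proofs are below) =====
def Claim_equal_char2bin : Prop := ∀ (char : String), Dom_char2bin char → Pre_char2bin char → Spec_char2bin char (char2bin char)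

-- ===== LEMMAS AND PROOFS =====
theorem core_eq : ∀ n < 127, char2binCore n = char2binAltCore n := by decide

-- ===== VERDICT (by name: the statement is the Claim_ definition above) =====
theorem char2bin_spec : Claim_equal_char2bin := by
  intro char hdom hpre
  unfold Spec_char2bin char2bin char2bin_alt
  match h : char.toList with
  | [c] =>
    have hall : ∀ x ∈ char.toList, pvDomChar x = true := List.all_eq_true.mp hdom
    have hc : pvDomChar c = true := hall c (by rw [h]; simp)
    have hlt : c.toNat < 127 := by
      simp only [pvDomChar, Bool.or_eq_true, Bool.and_eq_true, decide_eq_true_eq, beq_iff_eq] at hc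
      omega
    simpa [h] using core_eq c.toNat hlt
  | [] => simp [Pre_char2bin, h] at hpre
  | _ :: _ :: _ => simp [Pre_char2bin, h] at hpre
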